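-- pv_equiv track=rewrite | github.com/JoseHurtado03/Jacobi_Project | jacobi.py | createMatrixD
-- ===== SOURCE A (Python) =====
-- def createMatrixD(matrix):
--     n_rows = len(matrix)
--     n_columns = len(matrix[0]) if matrix else 0
--     min_dimension = min(n_rows, n_columns)
--     matrixD = []
--     for i in range(min_dimension):
--         fila_diagonal = [0] * i + [matrix[i][i]] + [0] * (min_dimension - i - 1)
--         matrixD.append(fila_diagonal)
--     return matrixD
-- ===== SOURCE B (Python) =====
-- def createMatrixD(matrix):
--     n_rows = len(matrix)
--     n_columns = len(matrix[0]) if matrix else 0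
--     m = min(n_rows, n_columns)
--     d = [matrix[i][i] for i in range(m)]
--     return _diag_from(d)
--
-- def _diag_from(d):
--     if not d:
--         return []
--     first = [d[0]] + [0] * (len(d) - 1)
--     return [first] + [[0] + row for row in _diag_from(d[1:])]
-- ===== Notes on version B (the rewrite author's own statement) =====
-- stated objective: alternative
-- what changed: B first extracts the diagonal as a vector in one pass and then builds the matrix by recursive border peeling (place the head entry, recurse on the tail, prepend a zero column to every recursive row), instead of A's single loop that concatenates zero-padding pieces per row.
import Mathlib
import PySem

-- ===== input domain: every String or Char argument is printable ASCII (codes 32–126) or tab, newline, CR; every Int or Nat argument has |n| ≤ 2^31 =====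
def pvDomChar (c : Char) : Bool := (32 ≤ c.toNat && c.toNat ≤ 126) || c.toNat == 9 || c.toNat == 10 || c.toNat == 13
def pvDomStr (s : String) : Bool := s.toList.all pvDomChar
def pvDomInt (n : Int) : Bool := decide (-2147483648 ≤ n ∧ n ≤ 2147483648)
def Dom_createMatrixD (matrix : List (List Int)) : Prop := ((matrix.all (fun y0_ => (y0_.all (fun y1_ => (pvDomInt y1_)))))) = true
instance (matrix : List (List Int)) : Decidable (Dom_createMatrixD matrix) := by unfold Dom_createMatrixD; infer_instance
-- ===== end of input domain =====

-- B extracts the diagonal vector in one pass and then builds the diagonal matrix by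
-- recursive border peeling, instead of A's loop concatenating zero-padding pieces per row
-- (objective: alternative decomposition, same cost).

-- ===== PORT A =====
def createMatrixD (matrix : List (List Int)) : List (List Int) :=
  let n_rows : Int := matrix.length
  let n_columns : Int := if matrix ≠ [] then (((PySem.List.pyGet? matrix 0).getD []).length : Int) else 0
  let min_dimension : Int := min n_rows n_columns
  (PySem.List.pyRange 0 min_dimension 1).foldl
    (fun acc i =>
      acc ++ [List.replicate i.toNat (0:Int)
              ++ [(PySem.List.pyGet? ((PySem.List.pyGet? matrix i).getD []) i).getD 0]
              ++ List.replicate (min_dimension - i - 1).toNat (0:Int)]) []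

-- ===== PORT B =====
-- helper _diag_from: diagonal matrix of a vector by border peeling
def diagFrom (d : List Int) : List (List Int) :=
  match d with
  | [] => []
  | x :: rest =>
    (x :: List.replicate rest.length (0:Int)) :: (diagFrom rest).map (fun row => 0 :: row)

def createMatrixD_alt (matrix : List (List Int)) : List (List Int) :=
  let n_rows : Nat := matrix.length
  let n_columns : Nat := if matrix ≠ [] then ((PySem.List.pyGet? matrix 0).getD []).length else 0
  let m : Nat := min n_rows n_columns
  let d : List Int := (List.range m).map
    (fun (i : Nat) => (PySem.List.pyGet? ((PySem.List.pyGet? matrix (i:Int)).getD []) (i:Int)).getD 0)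
  diagFrom d

-- ===== PRECONDITION & SPEC =====
-- Pre_ excludes only the ragged matrices on which A raises IndexError at matrix[i][i]
-- (a diagonal entry whose row is shorter than i+1); B raises there too.
def Pre_createMatrixD (matrix : List (List Int)) : Prop :=
  ∀ i, i < min matrix.length ((matrix.headD []).length) → i < (matrix.getD i []).length
instance (matrix : List (List Int)) : Decidable (Pre_createMatrixD matrix) := by
  unfold Pre_createMatrixD; infer_instance
def pvWitness_createMatrixD : List (List Int) := [[1, 2], [3, 4]]
def Spec_createMatrixD (matrix : List (List Int)) (out : List (List Int)) : Prop := out = createMatrixD_alt matrix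
instance (matrix : List (List Int)) (out : List (List Int)) : Decidable (Spec_createMatrixD matrix out) := by unfold Spec_createMatrixD; infer_instance

-- ===== CLAIM (what is proved, stated in full; the proofs are below) =====
def Claim_equal_createMatrixD : Prop := ∀ (matrix : List (List Int)), Dom_createMatrixD matrix → Pre_createMatrixD matrix → Spec_createMatrixD matrix (createMatrixD matrix)

-- ===== LEMMAS AND PROOFS =====

-- the common dimension, as a Nat
def pvM (matrix : List (List Int)) : Nat :=
  min matrix.length ((matrix.headD []).length)

-- the i-th diagonal entry, matrix[i][i]
def pvA (matrix : List (List Int)) (i : Nat) : Int :=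
  (matrix.getD i []).getD i 0

lemma pvGet_head (matrix : List (List Int)) (h : matrix ≠ []) :
    (PySem.List.pyGet? matrix 0).getD [] = matrix.headD [] := by
  cases matrix with
  | nil => simp at h
  | cons x xs => simp [PySem.List.pyGet?, PySem.List.pyIdx?]

-- a set on a zero row = three-piece concatenation
lemma set_replicate_zero :
    ∀ (i m : Nat), i < m → ∀ (a : Int),
      (List.replicate m (0:Int)).set i a
        = List.replicate i (0:Int) ++ a :: List.replicate (m - i - 1) (0:Int) := by
  intro i
  induction i with
  | zero =>
    intro m hm a
    cases m with
    | zero => omega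
    | succ m' => simp [List.replicate_succ]
  | succ i ih =>
    intro m hm a
    cases m with
    | zero => omega
    | succ m' =>
      simp only [List.replicate_succ, List.set_cons_succ, ih m' (by omega) a,
        List.cons_append]
      have : m' + 1 - (i + 1) - 1 = m' - i - 1 := by omega
      rw [this]

-- under Pre_, the ports' PySem index chain is the real diagonal entry
lemma pvA_eq (matrix : List (List Int)) (h : Pre_createMatrixD matrix)
    (i : Nat) (hi : i < pvM matrix) :
    (PySem.List.pyGet? ((PySem.List.pyGet? matrix (i:Int)).getD []) (i:Int)).getD 0
      = pvA matrix i := by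
  have h1 : i < matrix.length := lt_of_lt_of_le hi (Nat.min_le_left _ _)
  have h2 : i < (matrix.getD i []).length := h i hi
  have houter : (PySem.List.pyGet? matrix (i:Int)).getD [] = matrix.getD i [] := by
    rw [PySem.List.pyGet?_natCast, List.getElem?_eq_getElem h1, Option.getD_some,
      List.getD_eq_getElem?_getD, List.getElem?_eq_getElem h1, Option.getD_some]
  rw [houter, PySem.List.pyGet?_natCast, List.getElem?_eq_getElem h2, Option.getD_some]
  unfold pvA
  exact (List.getD_eq_getElem _ _ h2).symm

lemma min_dim_eq (matrix : List (List Int)) :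
    (min (matrix.length : Int)
      (if matrix ≠ [] then (((PySem.List.pyGet? matrix 0).getD []).length : Int) else 0))
    = (pvM matrix : Int) := by
  cases matrix with
  | nil => simp [pvM]
  | cons x xs =>
    rw [pvGet_head _ (by simp)]
    simp [pvM, Nat.cast_min]

-- A's port = canonical form
lemma portA_eq (matrix : List (List Int)) (h : Pre_createMatrixD matrix) :
    createMatrixD matrix
      = (List.range (pvM matrix)).map
          (fun i => (List.replicate (pvM matrix) (0:Int)).set i (pvA matrix i)) := by
  unfold createMatrixD
  simp only []
  rw [min_dim_eq]
  rw [PySem.List.foldl_append_singleton_eq_map, PySem.List.pyRange_one]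
  simp only [zero_add, Int.sub_zero, Int.toNat_natCast, List.map_map, List.nil_append]
  apply List.map_congr_left
  intro k hk
  rw [List.mem_range] at hk
  simp only [Function.comp]
  rw [← pvA_eq matrix h k hk, set_replicate_zero _ _ hk]
  have h1 : ((k:Int)).toNat = k := Int.toNat_natCast k
  have h2 : (((pvM matrix):Int) - (k:Int) - 1).toNat = pvM matrix - k - 1 := by omega
  rw [h1, h2]
  simp

-- border peeling = canonical form
lemma diagFrom_eq (d : List Int) :
    diagFrom d
      = (List.range d.length).map
          (fun i => (List.replicate d.length (0:Int)).set i (d.getD i 0)) := by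
  induction d with
  | nil => simp [diagFrom]
  | cons x rest ih =>
    rw [diagFrom, ih]
    rw [List.length_cons, List.range_succ_eq_map, List.map_cons, List.map_map]
    refine congrArg₂ List.cons ?_ ?_
    · simp [List.replicate_succ]
    · simp only [List.map_map]
      apply List.map_congr_left
      intro k hk
      simp [Function.comp, List.replicate_succ]

-- B's port = canonical form
lemma portB_eq (matrix : List (List Int)) (h : Pre_createMatrixD matrix) :
    createMatrixD_alt matrix
      = (List.range (pvM matrix)).map
          (fun i => (List.replicate (pvM matrix) (0:Int)).set i (pvA matrix i)) := by
  unfold createMatrixD_alt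
  simp only []
  have hm : (if matrix ≠ [] then ((PySem.List.pyGet? matrix 0).getD []).length else 0)
      = (matrix.headD []).length := by
    cases matrix with
    | nil => simp
    | cons x xs => rw [if_pos (by simp), pvGet_head _ (by simp)]
  rw [hm]
  rw [show min matrix.length (matrix.headD []).length = pvM matrix from rfl]
  rw [diagFrom_eq]
  rw [List.length_map, List.length_range]
  apply List.map_congr_left
  intro k hk
  rw [List.mem_range] at hk
  rw [List.getD_eq_getElem?_getD, List.getElem?_map, List.getElem?_range hk]
  simp only [Option.map_some, Option.getD_some]
  rw [pvA_eq matrix h k hk]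

-- ===== VERDICT (by name: the statement is the Claim_ definition above) =====
theorem createMatrixD_spec : Claim_equal_createMatrixD := by
  intro matrix _ hpre
  unfold Spec_createMatrixD
  rw [portA_eq matrix hpre, portB_eq matrix hpre]
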